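-- pv_equiv track=rewrite | github.com/bpnsingh/practice | scaler/advanc_array_1/beggar.py | solve
-- ===== SOURCE A (Python) =====
-- def solve(A, B):
--     #create a prefix sum with 0 velaue and A length
--     psum = [0]*A
--     print (psum)
--     for s,e,amount in B:
--         s = s-1
--         e= e-1
--         if e == A -1:
--             psum[s] += amount
--         else:
--             print (s,e,B)
--             psum[s] += amount
--             psum[e+1] -= amount
--     #process prefix sum
--     ans =[]
--     sum = 0
--     for num in psum:
--         sum += num
--         ans.append(sum)
--     return ans
-- ===== SOURCE B (Python) =====
-- # Alternative: per-query bulk suffix updates via slice assignment on the answer array,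
-- # instead of marking a difference array and running a separate prefix-sum pass.
-- def solve(A, B):
--     ans = [0] * A
--     print(ans)
--     for s, e, amount in B:
--         if e != A:
--             print(s - 1, e - 1, B)
--         ans[s - 1:] = [x + amount for x in ans[s - 1:]]
--         if e != A:
--             ans[e:] = [x - amount for x in ans[e:]]
--     return ans
-- ===== Notes on version B (the rewrite author's own statement) =====
-- stated objective: alternative
-- what changed: Replaces the difference-array-plus-prefix-sum-pass with direct per-query bulk suffix updates via slice assignment on the answer array (each query adds amount from its start index onward and, unless it runs to the end, subtracts it from its end index onward), so there is no psum array and no final scan.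
import Mathlib
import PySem

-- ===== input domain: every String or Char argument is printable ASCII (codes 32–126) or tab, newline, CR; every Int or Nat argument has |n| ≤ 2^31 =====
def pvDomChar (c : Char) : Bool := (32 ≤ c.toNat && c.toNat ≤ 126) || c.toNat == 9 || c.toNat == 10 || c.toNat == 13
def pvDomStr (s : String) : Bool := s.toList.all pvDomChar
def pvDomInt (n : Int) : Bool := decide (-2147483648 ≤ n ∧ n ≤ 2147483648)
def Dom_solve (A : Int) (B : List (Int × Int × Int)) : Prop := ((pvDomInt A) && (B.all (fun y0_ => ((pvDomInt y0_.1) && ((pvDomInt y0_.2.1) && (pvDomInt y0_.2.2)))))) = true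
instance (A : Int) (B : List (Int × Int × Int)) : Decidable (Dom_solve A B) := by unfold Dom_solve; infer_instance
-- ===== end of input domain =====

-- B is an alternative algorithm (same cost class is not claimed): per-query bulk suffix
-- updates via slice assignment instead of a difference array plus a prefix-sum pass.
-- Equivalence is about the RETURN value; both Pythons also print the same lines,
-- but prints are not modelled here.

-- ===== PORT A =====
-- one query of A's loop: psum[s] += amount; unless e == A-1 also psum[e+1] -= amount
def solveStepA (A : Int) (psum : List Int) (q : Int × Int × Int) : List Int :=
  let s := q.1 - 1
  let e := q.2.1 - 1
  if e = A - 1 then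
    PySem.List.pySetD psum s (PySem.List.pyGetD psum s 0 + q.2.2)
  else
    let p1 := PySem.List.pySetD psum s (PySem.List.pyGetD psum s 0 + q.2.2)
    PySem.List.pySetD p1 (e + 1) (PySem.List.pyGetD p1 (e + 1) 0 - q.2.2)

def solve (A : Int) (B : List (Int × Int × Int)) : List Int :=
  let psum := B.foldl (solveStepA A) (List.replicate A.toNat 0)
  -- process prefix sum: ans = []; sum = 0; for num in psum: sum += num; ans.append(sum)
  (psum.foldl (fun (st : List Int × Int) num => (st.1 ++ [st.2 + num], st.2 + num)) ([], 0)).1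

-- ===== PORT B =====
-- ans[p:] = [f(x) for x in ans[p:]]  (slice assignment: result is ans[:p] ++ new suffix)
def suffixUpdate (ans : List Int) (p : Int) (f : Int → Int) : List Int :=
  PySem.List.slice ans none (some p) ++ (PySem.List.slice ans (some p) none).map f

def solveStepB (A : Int) (ans : List Int) (q : Int × Int × Int) : List Int :=
  let ans1 := suffixUpdate ans (q.1 - 1) (fun x => x + q.2.2)
  if q.2.1 ≠ A then suffixUpdate ans1 q.2.1 (fun x => x - q.2.2) else ans1

def solve_alt (A : Int) (B : List (Int × Int × Int)) : List Int :=
  B.foldl (solveStepB A) (List.replicate A.toNat 0)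

-- ===== PRECONDITION & SPEC =====
-- Pre: exactly the inputs on which Python A returns (no IndexError): every query's start
-- index s-1 is a valid Python index of the length-A list, and its end e is either A
-- (full-range branch) or itself a valid Python index.
def Pre_solve (A : Int) (B : List (Int × Int × Int)) : Prop :=
  ∀ q ∈ B, (-A ≤ q.1 - 1 ∧ q.1 - 1 < A) ∧ (q.2.1 = A ∨ (-A ≤ q.2.1 ∧ q.2.1 < A))
instance (A : Int) (B : List (Int × Int × Int)) : Decidable (Pre_solve A B) := by
  unfold Pre_solve; infer_instance

def pvWitness_solve : Int × (List (Int × Int × Int)) := (3, [(1, 2, 5), (2, 3, 4), (3, 1, -2)])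

def Spec_solve (A : Int) (B : List (Int × Int × Int)) (out : List Int) : Prop := out = solve_alt A B
instance (A : Int) (B : List (Int × Int × Int)) (out : List Int) : Decidable (Spec_solve A B out) := by unfold Spec_solve; infer_instance

-- ===== CLAIM (what is proved, stated in full; the proofs are below) =====
def Claim_equal_solve : Prop := ∀ (A : Int) (B : List (Int × Int × Int)), Dom_solve A B → Pre_solve A B → Spec_solve A B (solve A B)

-- ===== LEMMAS AND PROOFS =====

-- proof-side normalization of a valid (possibly negative) Python index
def pvStart (i n : Int) : Int := if i < 0 then i + n else i

-- the prefix-sum scan of A's final loop, in structural form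
def scanList (c : Int) : List Int → List Int
  | [] => []
  | x :: xs => (c + x) :: scanList (c + x) xs

-- add a to every element at position ≥ p
def mAdd (a : Int) (p : Nat) (l : List Int) : List Int :=
  l.mapIdx (fun k x => if p ≤ k then x + a else x)

lemma length_scanList (c : Int) (l : List Int) : (scanList c l).length = l.length := by
  induction l generalizing c with
  | nil => rfl
  | cons x xs ih => simp [scanList, ih]

lemma getElem_scanList (c : Int) (l : List Int) (k : Nat) (hk : k < l.length) :
    (scanList c l)[k]'(by rw [length_scanList]; exact hk) = c + (l.take (k + 1)).sum := by
  induction l generalizing c k with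
  | nil => simp at hk
  | cons x xs ih =>
    cases k with
    | zero => simp [scanList]
    | succ m =>
      simp only [scanList, List.getElem_cons_succ, List.take_succ_cons, List.sum_cons]
      rw [ih (c + x) m (by simpa using hk)]
      ring

lemma foldl_scan_eq (l : List Int) (acc : List Int) (c : Int) :
    (l.foldl (fun (st : List Int × Int) num => (st.1 ++ [st.2 + num], st.2 + num)) (acc, c)) =
      (acc ++ scanList c l, c + l.sum) := by
  induction l generalizing acc c with
  | nil => simp [scanList]
  | cons x xs ih => simp [scanList, ih, add_assoc]

lemma length_mAdd (a : Int) (p : Nat) (l : List Int) : (mAdd a p l).length = l.length := by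
  simp [mAdd]

lemma getElem_mAdd (a : Int) (p : Nat) (l : List Int) (k : Nat) (hk : k < l.length) :
    (mAdd a p l)[k]'(by rw [length_mAdd]; exact hk) = if p ≤ k then l[k] + a else l[k] := by
  simp [mAdd]

-- the core commuting fact: setting one cell of the difference array shifts the whole
-- suffix of the prefix-sum scan
lemma scan_set (l : List Int) (i : Nat) (hi : i < l.length) (b : Int) :
    scanList 0 (l.set i (l[i] + b)) = mAdd b i (scanList 0 l) := by
  apply List.ext_getElem
  · simp [length_scanList, length_mAdd]
  · intro k h1 h2
    have hk : k < l.length := by simpa [length_scanList] using h1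
    have hsk : k < (scanList 0 l).length := by rw [length_scanList]; exact hk
    rw [getElem_scanList 0 (l.set i (l[i] + b)) k (by simpa using hk)]
    rw [getElem_mAdd b i (scanList 0 l) k hsk]
    rw [getElem_scanList 0 l k hk]
    by_cases hik : i ≤ k
    · rw [if_pos hik]
      have hiL : i < (l.take (k + 1)).length := by simp; omega
      rw [List.take_set, List.sum_set, if_pos hiL]
      have hsplit := List.sum_take_add_sum_drop (l.take (k + 1)) i
      rw [List.drop_eq_getElem_cons hiL, List.sum_cons] at hsplit
      have hLi : (l.take (k + 1))[i]'hiL = l[i]'hi := List.getElem_take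
      rw [hLi] at hsplit
      omega
    · rw [if_neg hik, List.take_set, List.set_eq_of_length_le (by simp; omega)]

-- mAdd in take/drop form: B's slice assignment produces exactly this shape
lemma mAdd_take_drop (a : Int) (m : Nat) (l : List Int) :
    mAdd a m l = l.take m ++ (l.drop m).map (fun x => x + a) := by
  apply List.ext_getElem
  · simp [length_mAdd]; omega
  · intro k h1 h2
    have hk : k < l.length := by simpa [length_mAdd] using h1
    rw [getElem_mAdd a m l k hk]
    by_cases hkm : k < (l.take m).length
    · have hkm' : k < m := by simp at hkm; omega
      rw [List.getElem_append_left hkm, List.getElem_take,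
        if_neg (by omega : ¬ m ≤ k)]
    · have hmk : m ≤ k := by simp at hkm ⊢; omega
      have hmin : (l.take m).length = m := by simp; omega
      rw [List.getElem_append_right (by omega), if_pos hmk]
      rw [List.getElem_map, List.getElem_drop]
      congr 2
      omega

-- B's slice update equals mAdd at the normalized index, for a valid Python index p
lemma suffixUpdate_add (l : List Int) (p a : Int)
    (h1 : -(l.length : Int) ≤ p) (_h2 : p < (l.length : Int)) :
    suffixUpdate l p (fun x => x + a) = mAdd a (pvStart p (l.length : Int)).toNat l := by
  rw [mAdd_take_drop]
  unfold suffixUpdate pvStart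
  by_cases hp : 0 ≤ p
  · rw [PySem.List.slice_to l hp, PySem.List.slice_from l hp,
      if_neg (by omega : ¬ p < 0)]
  · have hk : 0 < (-p).toNat := by omega
    have hrw : p = -(((-p).toNat : Nat) : Int) := by omega
    rw [hrw, PySem.List.slice_to_neg_natCast l (-p).toNat hk, PySem.List.slice_from_neg_natCast l (-p).toNat hk,
      if_pos (by omega : (-(((-p).toNat : Nat) : Int)) < 0)]
    have : ((-(((-p).toNat : Nat) : Int)) + (l.length : Int)).toNat = l.length - (-p).toNat := by
      omega
    rw [this]

lemma suffixUpdate_sub (l : List Int) (p a : Int)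
    (h1 : -(l.length : Int) ≤ p) (h2 : p < (l.length : Int)) :
    suffixUpdate l p (fun x => x - a) = mAdd (-a) (pvStart p (l.length : Int)).toNat l := by
  have hf : (fun x : Int => x - a) = (fun x : Int => x + (-a)) := by
    funext x; ring
  rw [hf]
  exact suffixUpdate_add l p (-a) h1 h2

-- Python-index normalization: a valid (possibly negative) index resolves to pvStart
lemma pyIdx_norm (n : Nat) (i : Int) (h1 : -(n : Int) ≤ i) (h2 : i < (n : Int)) :
    PySem.List.pyIdx? n i = some (pvStart i (n : Int)).toNat := by
  unfold PySem.List.pyIdx? pvStart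
  split_ifs <;> first | rfl | omega | (congr 1; omega)

lemma pySetD_norm (xs : List Int) (i v : Int) (h1 : -(xs.length : Int) ≤ i) (h2 : i < (xs.length : Int)) :
    PySem.List.pySetD xs i v = xs.set (pvStart i (xs.length : Int)).toNat v := by
  simp only [PySem.List.pySetD, PySem.List.pySet?, pyIdx_norm xs.length i h1 h2,
    Option.map_some, Option.getD_some]

lemma pyGetD_norm (xs : List Int) (i d : Int) (h1 : -(xs.length : Int) ≤ i) (h2 : i < (xs.length : Int)) :
    PySem.List.pyGetD xs i d
      = xs[(pvStart i (xs.length : Int)).toNat]'(by unfold pvStart; split <;> omega) := by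
  have hk : (pvStart i (xs.length : Int)).toNat < xs.length := by unfold pvStart; split <;> omega
  simp [PySem.List.pyGetD, PySem.List.pyGet?, pyIdx_norm xs.length i h1 h2,
    List.getElem?_eq_getElem hk]

-- scan of one cell update of the difference array, + and - forms
lemma scan_pySetD_add (l1 : List Int) (e b : Int) (n : Nat) (hlen : l1.length = n)
    (h1 : -(n : Int) ≤ e) (h2 : e < (n : Int)) :
    scanList 0 (PySem.List.pySetD l1 e (PySem.List.pyGetD l1 e 0 + b))
      = mAdd b (pvStart e (n : Int)).toNat (scanList 0 l1) := by
  subst hlen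
  rw [pySetD_norm l1 _ _ h1 h2, pyGetD_norm l1 _ _ h1 h2]
  exact scan_set l1 _ (by unfold pvStart; split <;> omega) b

lemma scan_pySetD_sub (l1 : List Int) (e b : Int) (n : Nat) (hlen : l1.length = n)
    (h1 : -(n : Int) ≤ e) (h2 : e < (n : Int)) :
    scanList 0 (PySem.List.pySetD l1 e (PySem.List.pyGetD l1 e 0 - b))
      = mAdd (-b) (pvStart e (n : Int)).toNat (scanList 0 l1) := by
  subst hlen
  rw [pySetD_norm l1 _ _ h1 h2, pyGetD_norm l1 _ _ h1 h2, sub_eq_add_neg]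
  exact scan_set l1 _ (by unfold pvStart; split <;> omega) (-b)

-- per-query commuting: the scan of A's one-query update is B's one-query update of the scan
lemma step_comm (A : Int) (l : List Int) (q : Int × Int × Int)
    (hlen : (l.length : Int) = A)
    (hs : -A ≤ q.1 - 1 ∧ q.1 - 1 < A)
    (he : q.2.1 = A ∨ (-A ≤ q.2.1 ∧ q.2.1 < A)) :
    scanList 0 (solveStepA A l q) = solveStepB A (scanList 0 l) q := by
  obtain ⟨s, e, amt⟩ := q
  subst hlen
  simp only at hs he
  have hscanlen : ((scanList 0 l).length : Int) = (l.length : Int) := by rw [length_scanList]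
  have hsuffix1 : suffixUpdate (scanList 0 l) (s - 1) (fun x => x + amt)
      = mAdd amt (pvStart (s - 1) (l.length : Int)).toNat (scanList 0 l) := by
    rw [suffixUpdate_add (scanList 0 l) (s - 1) amt (by omega) (by omega), hscanlen]
  by_cases hcase : e = (l.length : Int)
  · subst hcase
    simp only [solveStepA, solveStepB, ite_true, ne_eq, not_true_eq_false, ite_false]
    rw [hsuffix1]
    exact scan_pySetD_add l (s - 1) amt l.length rfl hs.1 hs.2
  · have hee : -(l.length : Int) ≤ e ∧ e < (l.length : Int) := he.resolve_left hcase
    simp only [solveStepA, solveStepB]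
    rw [if_neg (show ¬ (e - 1 = (l.length : Int) - 1) by omega), if_pos hcase]
    rw [show e - 1 + 1 = e by ring]
    rw [scan_pySetD_sub _ e amt l.length (PySem.List.length_pySetD l _ _) hee.1 hee.2]
    rw [scan_pySetD_add l (s - 1) amt l.length rfl hs.1 hs.2]
    rw [hsuffix1]
    have hlen2 : ((mAdd amt (pvStart (s - 1) (l.length : Int)).toNat (scanList 0 l)).length : Int)
        = (l.length : Int) := by rw [length_mAdd, length_scanList]
    rw [suffixUpdate_sub _ e amt (by omega) (by omega), hlen2]

lemma scan_zeros (n : Nat) : scanList 0 (List.replicate n 0) = List.replicate n 0 := by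
  induction n with
  | zero => rfl
  | succ m ih => simp [List.replicate_succ, scanList, ih]

lemma main_fold (A : Int) : ∀ (B : List (Int × Int × Int)) (l : List Int),
    (l.length : Int) = A →
    (∀ q ∈ B, (-A ≤ q.1 - 1 ∧ q.1 - 1 < A) ∧ (q.2.1 = A ∨ (-A ≤ q.2.1 ∧ q.2.1 < A))) →
    scanList 0 (B.foldl (solveStepA A) l) = B.foldl (solveStepB A) (scanList 0 l) := by
  intro B
  induction B with
  | nil => intro l _ _; rfl
  | cons q r ih =>
    intro l hlen hpre
    simp only [List.foldl_cons]
    have hq := hpre q (List.mem_cons_self)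
    have hlen' : ((solveStepA A l q).length : Int) = A := by
      simp only [solveStepA]
      split <;> simp [PySem.List.length_pySetD, hlen]
    rw [ih _ hlen' (fun p hp => hpre p (List.mem_cons_of_mem q hp))]
    rw [step_comm A l q hlen hq.1 hq.2]

-- ===== VERDICT (by name: the statement is the Claim_ definition above) =====
theorem solve_spec : Claim_equal_solve := by
  intro A B _ hpre
  simp only [Spec_solve, solve, solve_alt, foldl_scan_eq, List.nil_append]
  by_cases hB : B = []
  · subst hB
    exact scan_zeros A.toNat
  · obtain ⟨q, hq⟩ := List.exists_mem_of_ne_nil B hB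
    have hbounds := hpre q hq
    have hA : 0 < A := by omega
    have hlen : ((List.replicate A.toNat (0 : Int)).length : Int) = A := by
      simp; omega
    rw [main_fold A B _ hlen hpre, scan_zeros]
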